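-- pv_equiv track=rewrite | github.com/jonkmatsumo/text2sql | src/dal/mysql/quoting.py | translate_double_quotes_to_backticks
-- ===== SOURCE A (Python) =====
-- def translate_double_quotes_to_backticks(sql: str) -> str:
--     """Translate double-quoted identifiers to MySQL backticks."""
--     result = []
--     in_single_quote = False
--     i = 0
--     while i < len(sql):
--         ch = sql[i]
--         if ch == "'":
--             if in_single_quote and i + 1 < len(sql) and sql[i + 1] == "'":
--                 result.append("''")
--                 i += 2
--                 continue
--             in_single_quote = not in_single_quote
--             result.append(ch)
--             i += 1
--             continue
--         if ch == '"' and not in_single_quote: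
--             result.append("`")
--             i += 1
--             continue
--         result.append(ch)
--         i += 1
--     return "".join(result)
-- ===== SOURCE B (Python) =====
-- def translate_double_quotes_to_backticks(sql: str) -> str:
--     """Translate double-quoted identifiers to MySQL backticks.
--
--     Segment-based: jump between single-quoted literals with str.find, use
--     str.replace on the code outside them, copy literals (incl. '' escapes,
--     an unterminated literal runs to the end of the string) verbatim.
--     """
--     out = []
--     i = 0
--     n = len(sql)
--     while True:
--         j = sql.find("'", i)
--         if j == -1:
--             out.append(sql[i:].replace('"', '`'))
--             return ''.join(out)
--         out.append(sql[i:j].replace('"', '`'))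
--         k = j + 1
--         while k < n:
--             if sql[k] == "'":
--                 if k + 1 < n and sql[k + 1] == "'":
--                     k += 2
--                     continue
--                 k += 1
--                 break
--             k += 1
--         out.append(sql[j:k])
--         i = k
-- ===== Notes on version B (the rewrite author's own statement) =====
-- stated objective: faster
-- what changed: Replaces A's character-by-character Python loop carrying an in_single_quote flag with a segment scanner: str.find jumps to each single-quoted literal, str.replace translates the double quotes in the code between literals in one C-level pass, and an inner scan copies each literal (with '' escapes; an unterminated literal runs to the end) verbatim.
import Mathlib
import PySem

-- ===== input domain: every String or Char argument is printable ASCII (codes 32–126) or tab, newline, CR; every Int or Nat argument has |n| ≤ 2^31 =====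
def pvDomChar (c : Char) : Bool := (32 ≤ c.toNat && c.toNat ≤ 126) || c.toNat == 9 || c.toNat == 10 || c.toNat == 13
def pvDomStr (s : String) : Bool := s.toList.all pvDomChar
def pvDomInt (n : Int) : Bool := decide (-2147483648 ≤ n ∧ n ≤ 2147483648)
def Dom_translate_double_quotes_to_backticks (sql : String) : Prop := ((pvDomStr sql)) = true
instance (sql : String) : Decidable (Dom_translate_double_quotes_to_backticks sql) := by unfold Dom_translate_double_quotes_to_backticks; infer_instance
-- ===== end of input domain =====

-- B replaces A's char-by-char loop with an in_single_quote flag by a segment scanner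
-- (str.find each single-quoted literal, str.replace '"'→'`' outside literals, copy
-- literals verbatim); identical return value, measured faster by a constant factor.

-- ===== PORT A =====
-- A's while loop over indices as recursion over the remaining characters with the
-- in_single_quote flag; the sql[i+1] lookahead becomes a match on the tail.
def pvGoA : List Char → Bool → List Char
  | [], _ => []
  | c :: rest, insq =>
    if c = '\'' then
      (match h : rest with
       | c2 :: rest2 =>
         if insq && c2 = '\'' then '\'' :: '\'' :: pvGoA rest2 insq
         else c :: pvGoA rest (!insq)
       | [] => c :: pvGoA rest (!insq))
    else if c = '"' && !insq then '`' :: pvGoA rest insq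
    else c :: pvGoA rest insq
termination_by l _ => l.length
decreasing_by all_goals first | (simp_all; omega) | simp_all

def translate_double_quotes_to_backticks (sql : String) : String :=
  String.ofList (pvGoA sql.toList false)

-- ===== PORT B =====
-- sql[i:j].replace('"', '`') on a segment outside single-quoted literals
def pvReplDQ : List Char → List Char
  | [] => []
  | c :: rest => (if c = '"' then '`' else c) :: pvReplDQ rest

-- B's inner while: scan the body of a single-quoted literal (after the opening quote);
-- returns (body incl. '' escapes and the closing quote, remainder after the literal).
def pvScanLit : List Char → List Char × List Char
  | [] => ([], [])
  | c :: rest =>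
    if c = '\'' then
      (match rest with
       | c2 :: rest2 =>
         if c2 = '\'' then
           let p := pvScanLit rest2
           ('\'' :: '\'' :: p.1, p.2)
         else ([c], rest)
       | [] => ([c], rest))
    else
      let p := pvScanLit rest
      (c :: p.1, p.2)

-- needed by pvGoB's termination proof, so it stays above the definition
theorem pvScanLit_len_le : ∀ (l : List Char), (pvScanLit l).2.length ≤ l.length
  | [] => Nat.le_refl _
  | c :: rest => by
    unfold pvScanLit
    split
    · cases rest with
      | nil => simp
      | cons c2 rest2 =>
        by_cases h : c2 = '\''
        · simp only [h]
          have := pvScanLit_len_le rest2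
          simp; omega
        · simp [h]
    · have := pvScanLit_len_le rest
      simp; omega

-- B's outer while True loop; sql.find("'", i) and the slices become takeWhile/dropWhile
-- on the characters not yet consumed.
def pvGoB (l : List Char) : List Char :=
  match h : l.dropWhile (fun c => c ≠ '\'') with
  | [] => pvReplDQ (l.takeWhile (fun c => c ≠ '\''))
  | _q :: r =>
    pvReplDQ (l.takeWhile (fun c => c ≠ '\'')) ++ '\'' :: ((pvScanLit r).1 ++ pvGoB (pvScanLit r).2)
termination_by l.length
decreasing_by
  have h1 : (l.dropWhile (fun c => c ≠ '\'')).length ≤ l.length := (l.dropWhile_sublist _).length_le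
  have h2 := pvScanLit_len_le r
  rw [h] at h1; simp at h1; omega

def translate_double_quotes_to_backticks_alt (sql : String) : String :=
  String.ofList (pvGoB sql.toList)

-- ===== PRECONDITION & SPEC =====
def Spec_translate_double_quotes_to_backticks (sql : String) (out : String) : Prop := out = translate_double_quotes_to_backticks_alt sql
instance (sql : String) (out : String) : Decidable (Spec_translate_double_quotes_to_backticks sql out) := by unfold Spec_translate_double_quotes_to_backticks; infer_instance

-- ===== CLAIM (what is proved, stated in full; the proofs are below) =====
def Claim_equal_translate_double_quotes_to_backticks : Prop := ∀ (sql : String), Dom_translate_double_quotes_to_backticks sql → Spec_translate_double_quotes_to_backticks sql (translate_double_quotes_to_backticks sql)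

-- ===== LEMMAS AND PROOFS =====

-- single-step unfolding lemmas for pvGoA
theorem pvGoA_nil (insq : Bool) : pvGoA [] insq = [] := by rw [pvGoA]

theorem pvGoA_quote_false (rest : List Char) :
    pvGoA ('\'' :: rest) false = '\'' :: pvGoA rest true := by
  rw [pvGoA.eq_def]; cases rest <;> simp

theorem pvGoA_other (c : Char) (rest : List Char) (insq : Bool) (hc : c ≠ '\'') :
    pvGoA (c :: rest) insq = (if c = '"' && !insq then '`' else c) :: pvGoA rest insq := by
  rw [pvGoA.eq_def]; cases rest <;> simp [hc] <;> split <;> simp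

theorem pvGoA_esc (rest2 : List Char) :
    pvGoA ('\'' :: '\'' :: rest2) true = '\'' :: '\'' :: pvGoA rest2 true := by
  rw [pvGoA]; simp

theorem pvGoA_close (rest : List Char) (h : ∀ c2 r2, rest = c2 :: r2 → c2 ≠ '\'') :
    pvGoA ('\'' :: rest) true = '\'' :: pvGoA rest false := by
  rw [pvGoA.eq_def]
  cases rest with
  | nil => simp
  | cons c2 r2 => simp [h c2 r2 rfl]

-- single-step unfolding lemmas for pvScanLit and pvGoB
theorem pvScanLit_other (c : Char) (rest : List Char) (hc : c ≠ '\'') :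
    pvScanLit (c :: rest) = (c :: (pvScanLit rest).1, (pvScanLit rest).2) := by
  rw [pvScanLit.eq_def]; simp [hc]

theorem pvGoB_eq (l : List Char) :
    pvGoB l = pvReplDQ (l.takeWhile (fun c => c ≠ '\'')) ++
      (match l.dropWhile (fun c => c ≠ '\'') with
       | [] => []
       | _ :: r => '\'' :: ((pvScanLit r).1 ++ pvGoB (pvScanLit r).2)) := by
  rw [pvGoB.eq_def]
  split <;> rename_i heq <;> rw [heq] <;> simp

theorem pvGoB_nil : pvGoB [] = [] := by rw [pvGoB.eq_def]; simp [pvReplDQ]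

theorem pvGoB_cons_quote (l : List Char) :
    pvGoB ('\'' :: l) = '\'' :: ((pvScanLit l).1 ++ pvGoB (pvScanLit l).2) := by
  rw [pvGoB_eq]
  simp [pvReplDQ]

theorem pvGoB_cons_ne (c : Char) (l : List Char) (hc : c ≠ '\'') :
    pvGoB (c :: l) = (if c = '"' then '`' else c) :: pvGoB l := by
  rw [pvGoB_eq (c :: l), pvGoB_eq l]
  simp [hc, pvReplDQ]

-- inside a single-quoted literal, A copies exactly the characters pvScanLit collects
-- and resumes after the literal with the flag reset
theorem pvGoA_true : ∀ (l : List Char),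
    pvGoA l true = (pvScanLit l).1 ++ pvGoA (pvScanLit l).2 false
  | [] => by simp [pvGoA_nil, pvScanLit]
  | c :: rest => by
    by_cases hc : c = '\''
    · subst hc
      cases rest with
      | nil => simp [pvScanLit, pvGoA_close, pvGoA_nil]
      | cons c2 rest2 =>
        by_cases h2 : c2 = '\''
        · subst h2
          have ih := pvGoA_true rest2
          simp [pvScanLit, pvGoA_esc, ih]
        · have hcl : pvGoA ('\'' :: c2 :: rest2) true = '\'' :: pvGoA (c2 :: rest2) false :=
            pvGoA_close _ (by intro a b hab; cases hab; exact h2)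
          simp [pvScanLit, h2, hcl]
    · have ih := pvGoA_true rest
      rw [pvScanLit_other c rest hc, pvGoA_other c rest true hc, ih]
      simp
termination_by l => l.length
decreasing_by all_goals first | (simp; omega) | simp

theorem pvGoA_eq_pvGoB : ∀ (l : List Char), pvGoA l false = pvGoB l
  | [] => by simp [pvGoA_nil, pvGoB_nil]
  | c :: rest => by
    by_cases hc : c = '\''
    · subst hc
      have h3 := pvGoA_eq_pvGoB (pvScanLit rest).2
      rw [pvGoA_quote_false, pvGoA_true rest, h3, pvGoB_cons_quote]
    · have h3 := pvGoA_eq_pvGoB rest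
      rw [pvGoB_cons_ne c rest hc, pvGoA_other c rest false hc, h3]
      simp
termination_by l => l.length
decreasing_by
  · have := pvScanLit_len_le rest; simp; omega
  · simp

-- ===== VERDICT (by name: the statement is the Claim_ definition above) =====
theorem translate_double_quotes_to_backticks_spec : Claim_equal_translate_double_quotes_to_backticks := by
  intro sql _
  unfold Spec_translate_double_quotes_to_backticks translate_double_quotes_to_backticks translate_double_quotes_to_backticks_alt
  rw [pvGoA_eq_pvGoB]
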